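-- pv_equiv track=rewrite | github.com/parseltongist/python3 | Banking System.py | luhn_algorithm_check
-- ===== SOURCE A (Python) =====
-- def luhn_algorithm_check(cc_number):
--     if cc_number[-1] == "0":
--         return False  # control digit cannot be 0
--     else:
--         # proceed with calculations:
--         cc_number = [int(x) for x in cc_number]
--         without_controlD = cc_number[0:15]
--         for x in range(0, len(without_controlD), 2):
--             without_controlD[x] *= 2
--         for x in range(len(without_controlD)):
--             if without_controlD[x] > 9:
--                 without_controlD[x] -= 9
--         digits_sum = sum(without_controlD)
--         #  obtaning control digit and check if it mathes provided one.
--         control_digit = int(10 - (digits_sum % 10))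
--         if control_digit == cc_number[15]: # numerating starts with 0, so checking if control digit provided mathes the generated
--             return True
--         else:
--             return False
--     return None
-- ===== SOURCE B (Python) =====
-- def luhn_algorithm_check(cc_number):
--     if cc_number[-1] == "0":
--         return False  # control digit cannot be 0
--     # tail recursion, two digits per step, no intermediate list; digits read as ord(c)-48
--     def dbl(d):
--         return 2 * d - 9 if d > 4 else 2 * d
--     def go(i, acc):
--         if i == 14:
--             return acc + dbl(ord(cc_number[14]) - 48)
--         return go(i + 2, acc + dbl(ord(cc_number[i]) - 48) + (ord(cc_number[i + 1]) - 48))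
--     total = go(0, 0)
--     return 10 - total % 10 == ord(cc_number[15]) - 48
-- ===== Notes on version B (the rewrite author's own statement) =====
-- stated objective: alternative
-- what changed: A materialises the whole string as a mutable int list and runs three staged passes over it (double even-indexed entries in place, subtract 9 from entries above 9, then sum) before deriving a control digit; B builds no list at all: a tail-recursive helper walks the first 15 digits two at a time, reading each digit as ord(c)-48 and folding the doubled value (2d-9 if d>4 else 2d) of the even-indexed digit and the plain odd-indexed digit into one accumulator, then compares 10 - total % 10 with digit 15.
import Mathlib
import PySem

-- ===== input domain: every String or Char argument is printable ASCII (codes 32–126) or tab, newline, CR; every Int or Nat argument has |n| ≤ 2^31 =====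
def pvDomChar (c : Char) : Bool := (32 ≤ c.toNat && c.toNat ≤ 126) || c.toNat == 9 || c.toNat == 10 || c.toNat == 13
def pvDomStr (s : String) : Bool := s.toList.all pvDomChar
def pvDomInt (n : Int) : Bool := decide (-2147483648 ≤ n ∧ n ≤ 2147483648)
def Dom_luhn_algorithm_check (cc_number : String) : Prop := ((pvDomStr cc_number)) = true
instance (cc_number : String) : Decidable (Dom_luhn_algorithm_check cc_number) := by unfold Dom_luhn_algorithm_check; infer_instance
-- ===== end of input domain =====

-- B replaces A's int-list materialisation and three staged passes (in-place doubling pass,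
-- >9 fix-up pass, sum) by a tail-recursive walk over the first 15 digits, two per step,
-- reading digits as ord(c)-48 and keeping one accumulator; same values on Pre_.

-- ===== PORT A =====
def luhn_algorithm_check (cc_number : String) : Bool :=
  match PySem.Str.pyGet? cc_number (-1) with
  | none => false  -- IndexError on empty string; excluded by Pre_
  | some c =>
    if c = '0' then false
    else
      match cc_number.toList.mapM (fun ch => PySem.Int.ofChars? [ch]) with
      | none => false  -- ValueError in int(x); excluded by Pre_
      | some ds =>
        let without_controlD := PySem.List.slice ds (some 0) (some 15)
        let without_controlD :=
          (PySem.List.pyRange 0 (without_controlD.length) 2).foldl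
            (fun l x => PySem.List.pySetD l x (PySem.List.pyGetD l x 0 * 2)) without_controlD
        let without_controlD :=
          (PySem.List.pyRange 0 (without_controlD.length) 1).foldl
            (fun l x => if PySem.List.pyGetD l x 0 > 9
                        then PySem.List.pySetD l x (PySem.List.pyGetD l x 0 - 9) else l)
            without_controlD
        let digits_sum := without_controlD.sum
        let control_digit : Int := 10 - PySem.Int.mod digits_sum 10
        match PySem.List.pyGet? ds 15 with
        | none => false  -- IndexError on short input; excluded by Pre_
        | some d15 => if control_digit = d15 then true else false

-- ===== PORT B =====
-- dbl(d) = 2*d - 9 if d > 4 else 2*d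
def pvDbl (d : Int) : Int := if d > 4 then 2 * d - 9 else 2 * d

-- ord(cc_number[i]) - 48; total via getD: the Python only raises outside Pre_
def pvOrdAt (s : List Char) (i : Nat) : Int := ((s.getD i ' ').toNat : Int) - 48

-- go(i, acc); the guard is '14 ≤ i' (Python writes i == 14) only so Lean sees termination:
-- go is only ever called at even i ≤ 14, where the two are the same test
def pvGo (s : List Char) (i : Nat) (acc : Int) : Int :=
  if 14 ≤ i then acc + pvDbl (pvOrdAt s 14)
  else pvGo s (i + 2) (acc + pvDbl (pvOrdAt s i) + pvOrdAt s (i + 1))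
  termination_by 14 - i

def luhn_algorithm_check_alt (cc_number : String) : Bool :=
  match PySem.Str.pyGet? cc_number (-1) with
  | none => false
  | some c =>
    if c = '0' then false
    else
      let total := pvGo cc_number.toList 0 0
      decide ((10 : Int) - PySem.Int.mod total 10 = pvOrdAt cc_number.toList 15)

-- ===== PRECONDITION & SPEC =====
-- Pre_ excludes exactly the inputs where the Python A raises: the empty string (IndexError on
-- cc_number[-1]) and, unless the last character is '0' (early False return), strings with a
-- non-digit character (ValueError in int(x)) or fewer than 16 characters (IndexError at index 15).
def Pre_luhn_algorithm_check (cc_number : String) : Prop :=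
  cc_number.toList ≠ [] ∧
    (cc_number.toList.getLast? = some '0' ∨
      (cc_number.toList.all Char.isDigit = true ∧ 16 ≤ cc_number.toList.length))
instance (cc_number : String) : Decidable (Pre_luhn_algorithm_check cc_number) := by
  unfold Pre_luhn_algorithm_check; infer_instance

def pvWitness_luhn_algorithm_check : String := "4532015112830366"

def Spec_luhn_algorithm_check (cc_number : String) (out : Bool) : Prop := out = luhn_algorithm_check_alt cc_number
instance (cc_number : String) (out : Bool) : Decidable (Spec_luhn_algorithm_check cc_number out) := by unfold Spec_luhn_algorithm_check; infer_instance

-- ===== CLAIM (what is proved, stated in full; the proofs are below) =====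
def Claim_equal_luhn_algorithm_check : Prop := ∀ (cc_number : String), Dom_luhn_algorithm_check cc_number → Pre_luhn_algorithm_check cc_number → Spec_luhn_algorithm_check cc_number (luhn_algorithm_check cc_number)

-- ===== LEMMAS AND PROOFS =====

-- a digit char's numeric bounds
lemma digit_bounds (c : Char) (h : c.isDigit = true) : 48 ≤ c.toNat ∧ c.toNat ≤ 57 := by
  simp [Char.isDigit] at h
  exact Prod.mk_le_mk.mp h

-- int(c) for a digit char c is its value
lemma ofChars_digit (c : Char) (h : c.isDigit = true) :
    PySem.Int.ofChars? [c] = some ((c.toNat : Int) - 48) := by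
  obtain ⟨h1, h2⟩ := digit_bounds c h
  have hc : c = Char.ofNat c.toNat := by simp [Char.ofNat_toNat]
  rw [hc]
  interval_cases h3 : c.toNat <;> decide

-- [int(x) for x in cc_number] on an all-digit string
lemma mapM_digits (cs : List Char) (h : cs.all Char.isDigit = true) :
    cs.mapM (fun ch => PySem.Int.ofChars? [ch])
      = some (cs.map (fun c => ((c.toNat : Int) - 48))) := by
  induction cs with
  | nil => rfl
  | cons c t ih =>
    simp only [List.all_cons, Bool.and_eq_true] at h
    simp [List.mapM_cons, ofChars_digit c h.1, ih h.2]

-- an index-update loop over distinct in-range indices, characterised pointwise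
lemma foldl_set_spec (g : Int → Int) (body : List Int → Int → List Int)
    (hb : ∀ (l : List Int) (x : Int), 0 ≤ x → x < (l.length : Int) →
      (body l x).length = l.length ∧
      ∀ (j : Nat), (body l x)[j]? = if (j : Int) = x then l[j]?.map g else l[j]?) :
    ∀ (idxs : List Int) (l : List Int),
      (∀ x ∈ idxs, 0 ≤ x ∧ x < (l.length : Int)) → idxs.Nodup →
      (idxs.foldl body l).length = l.length ∧
      ∀ (j : Nat), (idxs.foldl body l)[j]?
          = if (j : Int) ∈ idxs then l[j]?.map g else l[j]? := by
  intro idxs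
  induction idxs with
  | nil => intro l _ _; simp
  | cons x rest ih =>
    intro l hmem hnd
    obtain ⟨hx0, hxlt⟩ := hmem x (by simp)
    obtain ⟨hlen, hpt⟩ := hb l x hx0 hxlt
    have hmem' : ∀ y ∈ rest, 0 ≤ y ∧ y < ((body l x).length : Int) := by
      intro y hy; rw [hlen]; exact hmem y (by simp [hy])
    have hnd' : rest.Nodup := (List.nodup_cons.mp hnd).2
    have hxnot : x ∉ rest := (List.nodup_cons.mp hnd).1
    obtain ⟨hlen2, hpt2⟩ := ih (body l x) hmem' hnd'
    refine ⟨by simpa [hlen] using hlen2, ?_⟩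
    intro j
    rw [List.foldl_cons, hpt2 j, hpt j]
    by_cases hjx : (j : Int) = x
    · rw [hjx]; simp [hxnot]
    · by_cases hjr : (j : Int) ∈ rest <;> simp [hjx, hjr, List.mem_cons]

-- the heart of the A side: A's two index loops produce, pointwise, the Luhn-transformed
-- enumeration of the untouched digit list
lemma a_loops_eq_map (w : List Int) (hw : ∀ d ∈ w, 0 ≤ d ∧ d ≤ 9) :
    ((PySem.List.pyRange 0 ((((PySem.List.pyRange 0 (w.length) 2).foldl
        (fun l x => PySem.List.pySetD l x (PySem.List.pyGetD l x 0 * 2)) w)).length) 1).foldl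
      (fun l x => if PySem.List.pyGetD l x 0 > 9
                  then PySem.List.pySetD l x (PySem.List.pyGetD l x 0 - 9) else l)
      ((PySem.List.pyRange 0 (w.length) 2).foldl
        (fun l x => PySem.List.pySetD l x (PySem.List.pyGetD l x 0 * 2)) w))
    = (PySem.List.enumerate w 0).map
        (fun p => if PySem.Int.mod p.1 2 = 0 then pvDbl p.2 else p.2) := by
  -- loop-1 body: without_controlD[x] *= 2
  have hb1 : ∀ (l : List Int) (x : Int), 0 ≤ x → x < (l.length : Int) →
      ((fun l x => PySem.List.pySetD l x (PySem.List.pyGetD l x 0 * 2)) l x).length = l.length ∧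
      ∀ (j : Nat), ((fun l x => PySem.List.pySetD l x (PySem.List.pyGetD l x 0 * 2)) l x)[j]?
          = if (j : Int) = x then l[j]?.map (· * 2) else l[j]? := by
    intro l x hx0 hxlt
    dsimp only
    refine ⟨PySem.List.length_pySetD _ _ _, ?_⟩
    intro j
    rw [PySem.List.pyGetD_eq_getElem l 0 hx0 hxlt,
        PySem.List.pySetD_of_nonneg l _ hx0, List.getElem?_set]
    have hxn : x.toNat < l.length := by omega
    by_cases hj : (j : Int) = x
    · have hxj : x.toNat = j := by omega
      rw [if_pos hxj, if_pos hxn, if_pos hj, List.getElem?_eq_getElem (hxj ▸ hxn)]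
      simp [hxj]
    · have : x.toNat ≠ j := by omega
      simp [this, hj]
  -- loop-2 body: if without_controlD[x] > 9: without_controlD[x] -= 9
  have hb2 : ∀ (l : List Int) (x : Int), 0 ≤ x → x < (l.length : Int) →
      ((fun l x => if PySem.List.pyGetD l x 0 > 9
          then PySem.List.pySetD l x (PySem.List.pyGetD l x 0 - 9) else l) l x).length = l.length ∧
      ∀ (j : Nat), ((fun l x => if PySem.List.pyGetD l x 0 > 9
          then PySem.List.pySetD l x (PySem.List.pyGetD l x 0 - 9) else l) l x)[j]?
          = if (j : Int) = x then l[j]?.map (fun d => if d > 9 then d - 9 else d) else l[j]? := by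
    intro l x hx0 hxlt
    dsimp only
    have hxn : x.toNat < l.length := by omega
    rw [PySem.List.pyGetD_eq_getElem l 0 hx0 hxlt]
    by_cases hgt : l[x.toNat] > 9
    · rw [if_pos hgt]
      refine ⟨PySem.List.length_pySetD _ _ _, ?_⟩
      intro j
      rw [PySem.List.pySetD_of_nonneg l _ hx0, List.getElem?_set]
      by_cases hj : (j : Int) = x
      · have hxj : x.toNat = j := by omega
        rw [if_pos hxj, if_pos hxn, if_pos hj, List.getElem?_eq_getElem (hxj ▸ hxn)]
        simp only [Option.map_some]
        have hgt' : l[j]'(hxj ▸ hxn) > 9 := by simpa [hxj] using hgt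
        rw [if_pos hgt']
        simp [hxj]
      · have : x.toNat ≠ j := by omega
        simp [this, hj]
    · rw [if_neg hgt]
      refine ⟨rfl, ?_⟩
      intro j
      by_cases hj : (j : Int) = x
      · have hxj : j = x.toNat := by omega
        rw [if_pos hj, hxj, List.getElem?_eq_getElem hxn]
        simp [hgt]
      · simp [hj]
  have hmem1 : ∀ x ∈ PySem.List.pyRange 0 (w.length) 2, 0 ≤ x ∧ x < (w.length : Int) := by
    intro x hx
    rw [PySem.List.mem_pyRange_iff_of_pos (by norm_num)] at hx
    exact ⟨hx.1, hx.2.1⟩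
  have hnd1 : (PySem.List.pyRange 0 (w.length) 2).Nodup := by
    rw [PySem.List.pyRange_of_pos 0 (w.length) (by norm_num)]
    refine List.Nodup.map ?_ List.nodup_range
    intro a b h
    dsimp at h
    omega
  obtain ⟨hlen1, hpt1⟩ := foldl_set_spec (· * 2) _ hb1 (PySem.List.pyRange 0 (w.length) 2) w hmem1 hnd1
  set l1 := (PySem.List.pyRange 0 (w.length) 2).foldl
      (fun l x => PySem.List.pySetD l x (PySem.List.pyGetD l x 0 * 2)) w with hl1def
  have hmem2 : ∀ x ∈ PySem.List.pyRange 0 (l1.length) 1, 0 ≤ x ∧ x < (l1.length : Int) := by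
    intro x hx
    rw [PySem.List.mem_pyRange_one] at hx
    exact ⟨hx.1, hx.2⟩
  obtain ⟨hlen2, hpt2⟩ := foldl_set_spec (fun d => if d > 9 then d - 9 else d) _ hb2
      (PySem.List.pyRange 0 (l1.length) 1) l1 hmem2 (PySem.List.nodup_pyRange_one 0 (l1.length))
  apply List.ext_getElem?
  intro j
  rw [List.getElem?_map, PySem.List.getElem?_enumerate]
  rw [hpt2 j, hpt1 j]
  by_cases hj : j < w.length
  · have hj2 : (j : Int) ∈ PySem.List.pyRange 0 (l1.length) 1 := by
      rw [PySem.List.mem_pyRange_one]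
      constructor <;> [positivity; (rw [hlen1]; exact_mod_cast hj)]
    rw [if_pos hj2, List.getElem?_eq_getElem hj]
    obtain ⟨h0, h9⟩ := hw w[j] (List.getElem_mem hj)
    have hmod : PySem.Int.mod (j : Int) 2 = ((j % 2 : Nat) : Int) := by
      exact_mod_cast PySem.Int.mod_natCast j 2
    simp only [Option.map_some, zero_add, hmod]
    by_cases he : j % 2 = 0
    · have hin : (j : Int) ∈ PySem.List.pyRange 0 (w.length) 2 := by
        rw [PySem.List.mem_pyRange_iff_of_pos (by norm_num)]
        refine ⟨by positivity, by exact_mod_cast hj, by omega⟩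
      rw [if_pos hin]
      simp only [Option.map_some, he, Nat.cast_zero, ite_true]
      congr 1
      simp only [pvDbl]
      split_ifs <;> omega
    · have hout : (j : Int) ∉ PySem.List.pyRange 0 (w.length) 2 := by
        rw [PySem.List.mem_pyRange_iff_of_pos (by norm_num)]
        rintro ⟨-, -, hdvd⟩
        omega
      rw [if_neg hout]
      simp only [Option.map_some]
      rw [if_neg (show ¬ w[j] > 9 by omega),
          if_neg (show ¬ (((j % 2 : Nat) : Int) = 0) by omega)]
  · have h1 : w[j]? = none := List.getElem?_eq_none (by omega)
    have hj2 : (j : Int) ∉ PySem.List.pyRange 0 (l1.length) 1 := by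
      rw [PySem.List.mem_pyRange_one, hlen1]
      rintro ⟨-, hcon⟩
      have : j < w.length := by exact_mod_cast hcon
      omega
    rw [if_neg hj2]
    by_cases hj1 : (j : Int) ∈ PySem.List.pyRange 0 (w.length) 2
    · rw [if_pos hj1, h1]; rfl
    · rw [if_neg hj1, h1]; rfl

-- the B side: pvGo, unwound over 16 explicit characters, is that same transformed sum
lemma go_eq_sum (cs : List Char) (h : 16 ≤ cs.length) :
    ((PySem.List.enumerate
        (PySem.List.slice (cs.map (fun c => ((c.toNat : Int) - 48))) (some 0) (some 15)) 0).map
      (fun p => if PySem.Int.mod p.1 2 = 0 then pvDbl p.2 else p.2)).sum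
    = pvGo cs 0 0 := by
  match cs, h with
  | c0::c1::c2::c3::c4::c5::c6::c7::c8::c9::c10::c11::c12::c13::c14::c15::rest, _ =>
    rw [PySem.List.slice_zero_start, PySem.List.slice_to _ (by norm_num)]
    show ((PySem.List.enumerate (List.take 15 _) 0).map _).sum = _
    simp only [List.map_cons, List.take_succ_cons, List.take_zero]
    simp [pvGo, pvOrdAt, PySem.List.enumerate_cons, PySem.Int.mod]
    ring

-- ===== VERDICT (by name: the statement is the Claim_ definition above) =====
theorem luhn_algorithm_check_spec : Claim_equal_luhn_algorithm_check := by
  intro cc _ hpre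
  unfold Spec_luhn_algorithm_check
  obtain ⟨hne, hrest⟩ := hpre
  obtain ⟨c, hlast⟩ : ∃ c, cc.toList.getLast? = some c := by
    cases h : cc.toList.getLast? with
    | none => exact absurd (List.getLast?_eq_none_iff.mp h) hne
    | some c => exact ⟨c, rfl⟩
  have hget : PySem.Str.pyGet? cc (-1) = some c := by
    rw [show PySem.Str.pyGet? cc (-1) = PySem.List.pyGet? cc.toList (-1) from rfl,
        PySem.List.pyGet?_neg_one, hlast]
  have hgetL : PySem.List.pyGet? cc.toList (-1) = some c := by
    rw [PySem.List.pyGet?_neg_one, hlast]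
  by_cases hc0 : c = '0'
  · simp [luhn_algorithm_check, luhn_algorithm_check_alt, hgetL, hc0]
  · have hdig : cc.toList.all Char.isDigit = true ∧ 16 ≤ cc.toList.length := by
      rcases hrest with h0 | h
      · rw [hlast] at h0; cases h0; exact absurd rfl hc0
      · exact h
    obtain ⟨hall, hlen⟩ := hdig
    have hmapM := mapM_digits cc.toList hall
    set ds := cc.toList.map (fun c => ((c.toNat : Int) - 48)) with hds
    have hdslen : ds.length = cc.toList.length := by simp [hds]
    have h15lt : 15 < cc.toList.length := by omega
    have h15 : PySem.List.pyGet? ds 15 = some (ds[15]'(by omega)) := by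
      have := PySem.List.pyGet?_eq_some_getElem (xs := ds) (i := 15) (by norm_num)
        (by rw [hdslen]; exact_mod_cast hlen)
      simpa using this
    have hw : ∀ d ∈ PySem.List.slice ds (some 0) (some 15), 0 ≤ d ∧ d ≤ 9 := by
      intro d hd
      have hdm : d ∈ ds := PySem.List.mem_of_mem_slice _ _ _ hd
      rw [hds] at hdm
      obtain ⟨ch, hch, rfl⟩ := List.mem_map.mp hdm
      have := digit_bounds ch (by
        rw [List.all_eq_true] at hall
        exact hall ch hch)
      omega
    have hloops := a_loops_eq_map (PySem.List.slice ds (some 0) (some 15)) hw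
    have hgo := go_eq_sum cc.toList hlen
    rw [← hds] at hgo
    have hd15 : pvOrdAt cc.toList 15 = ds[15]'(by omega) := by
      simp [pvOrdAt, hds, List.getD, List.getElem?_eq_getElem h15lt]
    simp only [luhn_algorithm_check, luhn_algorithm_check_alt, hget, if_neg hc0, hmapM, h15]
    rw [hloops, hgo, hd15]
    simp
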